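-- pv_equiv track=rewrite | github.com/alicialeb/transformation_of_ui_logs_into_oc_event_data | functions.py | get_obj_type_based_on_att
-- ===== SOURCE A (Python) =====
-- def get_obj_type_based_on_att(header_att_types, att_to_obj_dict):
--     """
--     Identifies the object types that match the found attribute types according to the provided dictionary.
--
--     :param header_att_types: Dictionary including the attribute type recognized in the column headers and the column indices.
--     :param att_to_obj_dict: Dictionary mapping UI attribute types to UI object types.
--     :return: A dictionary the column indices and the object types according to the matched attribute types.
--     """
--     # dictionary to save the column indices and the object types according to the matched attribute types
--     header_obj_type_from_att_type = {}
--
--     # get the object types that match the found attribute types according to the mapping dictionary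
--     for key1, value1 in header_att_types.items():
--         for key2, values2 in att_to_obj_dict.items():
--             if value1 in values2:
--                 if key1 not in header_obj_type_from_att_type:
--                     header_obj_type_from_att_type[key1] = [key2]
--                 # some attributes can belong to different object types
--                 else:
--                     header_obj_type_from_att_type[key1].append(key2)
--
--     return header_obj_type_from_att_type
-- ===== SOURCE B (Python) =====
-- def get_obj_type_based_on_att(header_att_types, att_to_obj_dict):
--     # Inverted index: attribute type -> list of object types (in att_to_obj_dict order),
--     # built once, so each header column needs only one O(1) lookup.
--     index = {}
--     for obj_type, atts in att_to_obj_dict.items():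
--         seen = set()
--         for att in atts:
--             if att not in seen:
--                 seen.add(att)
--                 index.setdefault(att, []).append(obj_type)
--     result = {}
--     for col, att in header_att_types.items():
--         hit = index.get(att)
--         if hit:
--             if col in result:
--                 result[col] = result[col] + hit
--             else:
--                 result[col] = list(hit)
--     return result
-- ===== Notes on version B (the rewrite author's own statement) =====
-- stated objective: faster
-- what changed: Replaced the nested scan (every header column tested against every object-type's attribute list) by a precomputed inverted index attribute-type -> object-types, so each header column is resolved by a single dictionary lookup.
import Mathlib
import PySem

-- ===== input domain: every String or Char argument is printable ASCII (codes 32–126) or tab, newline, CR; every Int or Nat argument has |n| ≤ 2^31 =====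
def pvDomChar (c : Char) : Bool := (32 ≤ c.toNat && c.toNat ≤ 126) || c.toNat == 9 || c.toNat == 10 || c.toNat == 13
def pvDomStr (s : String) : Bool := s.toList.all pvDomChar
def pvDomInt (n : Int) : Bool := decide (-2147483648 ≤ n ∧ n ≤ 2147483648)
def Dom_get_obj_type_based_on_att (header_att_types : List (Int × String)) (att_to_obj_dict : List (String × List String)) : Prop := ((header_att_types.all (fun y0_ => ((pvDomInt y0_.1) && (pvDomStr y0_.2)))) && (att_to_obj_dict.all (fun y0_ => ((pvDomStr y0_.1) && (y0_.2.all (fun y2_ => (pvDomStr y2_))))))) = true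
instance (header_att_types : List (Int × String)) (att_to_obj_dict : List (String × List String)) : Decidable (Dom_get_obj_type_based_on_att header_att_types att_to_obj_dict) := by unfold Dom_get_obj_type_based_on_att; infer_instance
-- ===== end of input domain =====

-- B replaces A's nested header×object-type scan by a precomputed inverted index
-- attribute-type → object-types, so each header column is one dictionary lookup (objective: faster).

-- ===== PORT A =====
def get_obj_type_based_on_att (header_att_types : List (Int × String)) (att_to_obj_dict : List (String × List String)) : List (Int × List String) :=
  (header_att_types.foldl (fun res p1 =>
      att_to_obj_dict.foldl (fun res p2 =>
        if p1.2 ∈ p2.2 then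
          if ¬ res.contains p1.1 then res.insert p1.1 [p2.1]
          else res.modify p1.1 [] (fun l => l ++ [p2.1])
        else res) res)
    (PySem.Dict.empty : PySem.Dict Int (List String))).items

-- ===== PORT B =====
def get_obj_type_based_on_att_alt (header_att_types : List (Int × String)) (att_to_obj_dict : List (String × List String)) : List (Int × List String) :=
  let index : PySem.Dict String (List String) :=
    att_to_obj_dict.foldl (fun idx p2 =>
      (p2.2.foldl (fun (st : PySem.Dict String (List String) × PySem.Set String) att =>
          if att ∈ st.2 then st
          else (st.1.modify att [] (fun l => l ++ [p2.1]), PySem.Set.add st.2 att))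
        (idx, PySem.Set.empty)).1)
      PySem.Dict.empty
  (header_att_types.foldl (fun res p =>
      let hit := index.getD p.2 []
      if hit ≠ [] then
        if res.contains p.1 then res.modify p.1 [] (fun l => l ++ hit)
        else res.insert p.1 hit
      else res)
    (PySem.Dict.empty : PySem.Dict Int (List String))).items

-- ===== PRECONDITION & SPEC =====
def Spec_get_obj_type_based_on_att (header_att_types : List (Int × String)) (att_to_obj_dict : List (String × List String)) (out : List (Int × List String)) : Prop := out = get_obj_type_based_on_att_alt header_att_types att_to_obj_dict
instance (header_att_types : List (Int × String)) (att_to_obj_dict : List (String × List String)) (out : List (Int × List String)) : Decidable (Spec_get_obj_type_based_on_att header_att_types att_to_obj_dict out) := by unfold Spec_get_obj_type_based_on_att; infer_instance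

-- ===== CLAIM (what is proved, stated in full; the proofs are below) =====
def Claim_equal_get_obj_type_based_on_att : Prop := ∀ (header_att_types : List (Int × String)) (att_to_obj_dict : List (String × List String)), Dom_get_obj_type_based_on_att header_att_types att_to_obj_dict → Spec_get_obj_type_based_on_att header_att_types att_to_obj_dict (get_obj_type_based_on_att header_att_types att_to_obj_dict)

-- ===== LEMMAS AND PROOFS =====

-- object types whose attribute list contains v, in dictionary order
def pvMatches (att_to_obj_dict : List (String × List String)) (v : String) : List String :=
  (att_to_obj_dict.filter (fun p => decide (v ∈ p.2))).map (fun p => p.1)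

-- the effect of resolving one header column (k, whose matches are m) on the result dict
def pvExtend (res : PySem.Dict Int (List String)) (k : Int) (m : List String) : PySem.Dict Int (List String) :=
  if m ≠ [] then
    if res.contains k then res.modify k [] (fun l => l ++ m)
    else res.insert k m
  else res

lemma pvDict_modify_eq_insert {κ ν : Type} [BEq κ] (d : PySem.Dict κ ν) (k : κ) (d0 : ν) (f : ν → ν) :
    d.modify k d0 f = d.insert k (f (d.getD k d0)) := rfl

lemma pv_modify_modify (d : PySem.Dict Int (List String)) (k : Int) (a m : List String) :
    (d.modify k [] (fun l => l ++ a)).modify k [] (fun l => l ++ m)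
      = d.modify k [] (fun l => l ++ (a ++ m)) := by
  rw [pvDict_modify_eq_insert d, pvDict_modify_eq_insert _ k, pvDict_modify_eq_insert d,
      PySem.Dict.getD_insert_self, PySem.Dict.insert_insert_self, List.append_assoc]

lemma pv_insert_modify (d : PySem.Dict Int (List String)) (k : Int) (a m : List String) :
    (d.insert k a).modify k [] (fun l => l ++ m) = d.insert k (a ++ m) := by
  rw [pvDict_modify_eq_insert, PySem.Dict.getD_insert_self, PySem.Dict.insert_insert_self]

-- A's inner loop over att_to_obj_dict acts as pvExtend with the match list
lemma pv_inner_A (att : List (String × List String)) (k : Int) (v : String) :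
    ∀ res : PySem.Dict Int (List String),
      att.foldl (fun res p2 =>
          if v ∈ p2.2 then
            if ¬ res.contains k then res.insert k [p2.1]
            else res.modify k [] (fun l => l ++ [p2.1])
          else res) res
        = pvExtend res k (pvMatches att v) := by
  induction att with
  | nil => intro res; simp [pvMatches, pvExtend]
  | cons hd t ih =>
    intro res
    by_cases hv : v ∈ hd.2
    · have hm : pvMatches (hd :: t) v = hd.1 :: pvMatches t v := by
        simp [pvMatches, hv]
      simp only [List.foldl_cons, if_pos hv, ih, hm]
      by_cases hc : res.contains k
      · simp only [hc, not_true_eq_false, if_false]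
        by_cases hm' : pvMatches t v = []
        · simp [pvExtend, hm', hc]
        · simp [pvExtend, hm', PySem.Dict.contains_modify, hc, pv_modify_modify]
      · simp only [hc]
        by_cases hm' : pvMatches t v = []
        · simp [pvExtend, hm', hc]
        · simp [pvExtend, hm', PySem.Dict.contains_insert_self, hc, pv_insert_modify]
    · have hm : pvMatches (hd :: t) v = pvMatches t v := by
        simp [pvMatches, hv]
      simp only [List.foldl_cons, if_neg hv, ih, hm]

-- B's per-entry loop (with its seen-set) appends the object type to index[v] iff v occurs in the attribute list
lemma pv_inner_B (vs : List String) (obj : String) (v : String) :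
    ∀ (idx : PySem.Dict String (List String)) (seen : PySem.Set String),
      ((vs.foldl (fun (st : PySem.Dict String (List String) × PySem.Set String) att =>
          if att ∈ st.2 then st
          else (st.1.modify att [] (fun l => l ++ [obj]), PySem.Set.add st.2 att))
        (idx, seen)).1).getD v []
      = idx.getD v [] ++ (if v ∈ vs ∧ v ∉ seen then [obj] else []) := by
  induction vs with
  | nil => intro idx seen; simp
  | cons a t ih =>
    intro idx seen
    by_cases ha : a ∈ seen
    · simp only [List.foldl_cons, if_pos ha, ih]
      congr 1
      by_cases hvt : v ∈ t ∧ v ∉ seen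
      · rw [if_pos hvt, if_pos ⟨List.mem_cons_of_mem a hvt.1, hvt.2⟩]
      · rw [if_neg hvt, if_neg]
        rintro ⟨hv1, hv2⟩
        rcases List.mem_cons.1 hv1 with h | h
        · exact hv2 (h ▸ ha)
        · exact hvt ⟨h, hv2⟩
    · simp only [List.foldl_cons, if_neg ha, ih]
      rw [PySem.Dict.getD_modify]
      by_cases hva : v = a
      · subst hva
        have hv : v ∈ PySem.Set.add seen v := (PySem.Set.mem_add seen v v).2 (Or.inr rfl)
        rw [if_pos rfl, if_neg (fun hc => hc.2 hv),
            if_pos ⟨List.mem_cons_self .., ha⟩, List.append_nil]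
      · rw [if_neg hva]
        congr 1
        have hmem : v ∈ PySem.Set.add seen a ↔ v ∈ seen := by
          rw [PySem.Set.mem_add]; tauto
        by_cases hvt : v ∈ t ∧ v ∉ seen
        · rw [if_pos ⟨hvt.1, hmem.not.2 hvt.2⟩, if_pos ⟨List.mem_cons_of_mem a hvt.1, hvt.2⟩]
        · rw [if_neg (by rw [hmem]; tauto), if_neg (by rw [List.mem_cons]; tauto)]

-- the inverted index answers exactly pvMatches
lemma pv_index_getD (att : List (String × List String)) (v : String) :
    ∀ idx : PySem.Dict String (List String),
      (att.foldl (fun idx p2 =>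
          (p2.2.foldl (fun (st : PySem.Dict String (List String) × PySem.Set String) att' =>
              if att' ∈ st.2 then st
              else (st.1.modify att' [] (fun l => l ++ [p2.1]), PySem.Set.add st.2 att'))
            (idx, PySem.Set.empty)).1) idx).getD v []
      = idx.getD v [] ++ pvMatches att v := by
  induction att with
  | nil => intro idx; simp [pvMatches]
  | cons hd t ih =>
    intro idx
    simp only [List.foldl_cons, ih, pv_inner_B]
    by_cases hv : v ∈ hd.2
    · simp [pvMatches, hv, PySem.Set.empty]
    · simp [pvMatches, hv]

lemma pv_main (header_att_types : List (Int × String)) (att_to_obj_dict : List (String × List String)) :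
    get_obj_type_based_on_att header_att_types att_to_obj_dict
      = get_obj_type_based_on_att_alt header_att_types att_to_obj_dict := by
  have hA := PySem.List.foldl_congr_mem header_att_types
    (fun res p1 => att_to_obj_dict.foldl (fun res p2 =>
        if p1.2 ∈ p2.2 then
          if ¬ res.contains p1.1 then res.insert p1.1 [p2.1]
          else res.modify p1.1 [] (fun l => l ++ [p2.1])
        else res) res)
    (fun res p => pvExtend res p.1 (pvMatches att_to_obj_dict p.2))
    (PySem.Dict.empty : PySem.Dict Int (List String))
    (fun acc x _ => pv_inner_A att_to_obj_dict x.1 x.2 acc)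
  have hB := PySem.List.foldl_congr_mem header_att_types
    (fun res p =>
      if (att_to_obj_dict.foldl (fun idx p2 =>
            (p2.2.foldl (fun (st : PySem.Dict String (List String) × PySem.Set String) att =>
                if att ∈ st.2 then st
                else (st.1.modify att [] (fun l => l ++ [p2.1]), PySem.Set.add st.2 att))
              (idx, PySem.Set.empty)).1) PySem.Dict.empty).getD p.2 [] ≠ [] then
        if res.contains p.1 then
          res.modify p.1 [] (fun l => l ++ (att_to_obj_dict.foldl (fun idx p2 =>
            (p2.2.foldl (fun (st : PySem.Dict String (List String) × PySem.Set String) att =>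
                if att ∈ st.2 then st
                else (st.1.modify att [] (fun l => l ++ [p2.1]), PySem.Set.add st.2 att))
              (idx, PySem.Set.empty)).1) PySem.Dict.empty).getD p.2 [])
        else res.insert p.1 ((att_to_obj_dict.foldl (fun idx p2 =>
            (p2.2.foldl (fun (st : PySem.Dict String (List String) × PySem.Set String) att =>
                if att ∈ st.2 then st
                else (st.1.modify att [] (fun l => l ++ [p2.1]), PySem.Set.add st.2 att))
              (idx, PySem.Set.empty)).1) PySem.Dict.empty).getD p.2 [])
      else res)
    (fun res p => pvExtend res p.1 (pvMatches att_to_obj_dict p.2))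
    (PySem.Dict.empty : PySem.Dict Int (List String))
    (fun acc x _ => by
      beta_reduce
      rw [pv_index_getD att_to_obj_dict x.2 PySem.Dict.empty, PySem.Dict.getD_empty,
        List.nil_append]
      rfl)
  simp only [get_obj_type_based_on_att, get_obj_type_based_on_att_alt]
  rw [hA, hB]

-- ===== VERDICT (by name: the statement is the Claim_ definition above) =====
theorem get_obj_type_based_on_att_spec : Claim_equal_get_obj_type_based_on_att := by
  intro h a _
  exact pv_main h a
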